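-- pv_equiv track=rewrite | github.com/PrithwishJana/CoTran | transpilers/TSS_CodeConv_PyTranslations/186/GFG.py | maxSubStr
-- ===== SOURCE A (Python) =====
-- def maxSubStr(str, n):
--     count0 = 0
--     count1 = 0
--     cnt = 0
--     for i in range(0, n):
--         if str[i] == '0':
--             count0 += 1
--         else:
--             count1 += 1
--         if count0 == count1:
--             cnt += 1
--     if count0 != count1:
--         return - 1
--     return cnt
-- ===== SOURCE B (Python) =====
-- def maxSubStr(str, n):
--     # Greedy decomposition: repeatedly scan the shortest balanced chunk starting
--     # at i; each complete chunk contributes 1; if a chunk cannot be closed, -1.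
--     cnt = 0
--     i = 0
--     while i < n:
--         bal = 1 if str[i] == '0' else -1
--         j = i + 1
--         while j < n and bal != 0:
--             bal += 1 if str[j] == '0' else -1
--             j += 1
--         if bal != 0:
--             return -1
--         cnt += 1
--         i = j
--     return cnt
-- ===== Notes on version B (the rewrite author's own statement) =====
-- stated objective: alternative
-- what changed: Replaces A's single pass with global 0/1 counters by a greedy nested-loop decomposition: the outer loop repeatedly consumes the shortest balanced chunk found by an inner scan with a per-chunk balance reset to zero, counting chunks and returning -1 as soon as a chunk cannot be closed.
import Mathlib
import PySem

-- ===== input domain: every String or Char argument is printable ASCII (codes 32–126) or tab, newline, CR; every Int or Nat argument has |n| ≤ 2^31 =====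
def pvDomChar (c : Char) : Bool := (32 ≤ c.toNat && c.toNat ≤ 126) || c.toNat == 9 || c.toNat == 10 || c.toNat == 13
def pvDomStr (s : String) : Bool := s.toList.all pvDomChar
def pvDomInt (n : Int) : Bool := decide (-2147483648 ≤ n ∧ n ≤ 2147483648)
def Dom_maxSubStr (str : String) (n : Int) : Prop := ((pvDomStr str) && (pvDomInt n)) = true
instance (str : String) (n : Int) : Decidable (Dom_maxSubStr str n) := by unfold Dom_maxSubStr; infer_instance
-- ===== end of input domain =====

-- B replaces A's global two-counter single pass by a greedy decomposition into shortest
-- balanced chunks (outer loop over chunks, inner scan with a per-chunk balance).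

-- ===== PORT A =====
-- loop body of A: state (count0, count1, cnt); str[i] read with pyGet? (none = IndexError, excluded by Pre_)
def stepA (str : String) (st : Int × Int × Int) (i : Int) : Int × Int × Int :=
  let c := (PySem.Str.pyGet? str i).getD '1'
  let c0 := if c == '0' then st.1 + 1 else st.1
  let c1 := if c == '0' then st.2.1 else st.2.1 + 1
  let cnt := if c0 == c1 then st.2.2 + 1 else st.2.2
  (c0, c1, cnt)

def maxSubStr (str : String) (n : Int) : Int :=
  let r := (PySem.List.pyRange 0 n 1).foldl (stepA str) (0, 0, 0)
  if r.1 ≠ r.2.1 then -1 else r.2.2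

-- ===== PORT B =====
-- the ±1 value of one character in B ('0' → +1, anything else → -1)
def valv (c : Char) : Int := if c == '0' then 1 else -1

-- B's inner while loop: consume characters until the chunk balance hits 0 or input ends;
-- returns (final balance, remaining characters)
def scanChunk (b : Int) : List Char → Int × List Char
  | [] => (b, [])
  | c :: t => let b' := b + valv c; if b' = 0 then (0, t) else scanChunk b' t

theorem scanChunk_len : ∀ (cs : List Char) (b : Int), (scanChunk b cs).2.length ≤ cs.length := by
  intro cs
  induction cs with
  | nil => intro b; simp [scanChunk]
  | cons c t ih =>
    intro b
    simp only [scanChunk]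
    split
    · simp
    · exact le_trans (ih _) (Nat.le_succ _)

-- B's outer while loop: count the chunks; an early 'return -1' propagates as -1
def chunks : List Char → Int
  | [] => 0
  | c :: t =>
    let p := scanChunk (valv c) t
    if p.1 ≠ 0 then -1
    else
      let r := chunks p.2
      if r = -1 then -1 else 1 + r
termination_by cs => cs.length
decreasing_by
  exact Nat.lt_succ_of_le (scanChunk_len t (valv c))

def maxSubStr_alt (str : String) (n : Int) : Int :=
  chunks ((PySem.List.pyRange 0 n 1).map (fun i => (PySem.Str.pyGet? str i).getD '1'))

-- ===== PRECONDITION & SPEC =====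
-- A raises IndexError exactly when n > len(str) (then some str[i] is out of range); Pre_ excludes only that.
def Pre_maxSubStr (str : String) (n : Int) : Prop := n ≤ (str.toList.length : Int)
instance (str : String) (n : Int) : Decidable (Pre_maxSubStr str n) := by unfold Pre_maxSubStr; infer_instance

def pvWitness_maxSubStr : String × Int := ("0110", 4)

def Spec_maxSubStr (str : String) (n : Int) (out : Int) : Prop := out = maxSubStr_alt str n
instance (str : String) (n : Int) (out : Int) : Decidable (Spec_maxSubStr str n out) := by unfold Spec_maxSubStr; infer_instance

-- ===== CLAIM (what is proved, stated in full; the proofs are below) =====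
def Claim_equal_maxSubStr : Prop := ∀ (str : String) (n : Int), Dom_maxSubStr str n → Pre_maxSubStr str n → Spec_maxSubStr str n (maxSubStr str n)

-- ===== LEMMAS AND PROOFS =====

-- the prefix-balance sequence starting from balance s (proof-only characterisation)
def sums (s : Int) : List Char → List Int
  | [] => []
  | c :: t => (s + valv c) :: sums (s + valv c) t

def total (cs : List Char) : Int := (cs.map valv).sum

theorem foldA_spec : ∀ (cs : List Char) (str : String) (L : List Int) (c0 c1 cnt : Int),
    (L.map (fun i => (PySem.Str.pyGet? str i).getD '1')) = cs →
    (L.foldl (stepA str) (c0, c1, cnt)).1 - (L.foldl (stepA str) (c0, c1, cnt)).2.1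
        = (c0 - c1) + total cs ∧
    (L.foldl (stepA str) (c0, c1, cnt)).2.2
        = cnt + ((sums (c0 - c1) cs).count 0 : Int) := by
  intro cs
  induction cs with
  | nil =>
    intro str L c0 c1 cnt hL
    have : L = [] := by cases L <;> simp_all
    subst this; simp [total, sums]
  | cons c t ih =>
    intro str L c0 c1 cnt hL
    cases L with
    | nil => simp at hL
    | cons i L' =>
      simp only [List.map_cons, List.cons.injEq] at hL
      obtain ⟨hc, ht⟩ := hL
      simp only [List.foldl_cons]
      have hc' : (PySem.List.pyGet? str.toList i).getD '1' = c := hc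
      by_cases h0 : c = '0'
      · have hs : stepA str (c0, c1, cnt) i = (c0 + 1, c1, if c0 + 1 == c1 then cnt + 1 else cnt) := by
          simp [stepA, hc', h0]
        rw [hs]
        obtain ⟨ih1, ih2⟩ := ih str L' (c0 + 1) c1 _ ht
        refine ⟨?_, ?_⟩
        · rw [ih1]; simp [total, valv, h0]; ring
        · rw [ih2]
          have hv : valv c = 1 := by simp [valv, h0]
          simp only [sums, hv, List.count_cons]
          have : c0 + 1 - c1 = c0 - c1 + 1 := by ring
          rw [this]
          by_cases he : c0 + 1 = c1
          · have : c0 - c1 + 1 = 0 := by omega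
            simp [he, this]
            ring
          · have hne0 : ¬ (c0 - c1 + 1 = 0) := by omega
            simp [he, hne0]
      · have hs : stepA str (c0, c1, cnt) i = (c0, c1 + 1, if c0 == c1 + 1 then cnt + 1 else cnt) := by
          simp [stepA, hc', h0]
        rw [hs]
        obtain ⟨ih1, ih2⟩ := ih str L' c0 (c1 + 1) _ ht
        refine ⟨?_, ?_⟩
        · rw [ih1]; simp [total, valv, h0]; ring
        · rw [ih2]
          have hv : valv c = -1 := by simp [valv, h0]
          simp only [sums, hv, List.count_cons]
          have : c0 - (c1 + 1) = c0 - c1 + -1 := by ring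
          rw [this]
          by_cases he : c0 = c1 + 1
          · have h00 : c0 - c1 + -1 = 0 := by omega
            rw [h00]
            simp [he]
            ring
          · have : ¬ (c0 - c1 + -1 = 0) := by omega
            simp [he, this]

-- inner-scan characterisation: starting from a nonzero balance b, scanChunk either breaks at
-- the first zero of the balance sequence (splitting off one zero) or consumes everything
theorem scanChunk_spec : ∀ (cs : List Char) (b : Int), b ≠ 0 →
    ((scanChunk b cs).1 = 0 →
        ((sums b cs).count 0 : Int) = 1 + ((sums 0 (scanChunk b cs).2).count 0 : Int) ∧
        total cs = -b + total (scanChunk b cs).2) ∧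
    ((scanChunk b cs).1 ≠ 0 →
        (sums b cs).count 0 = 0 ∧ (scanChunk b cs).2 = [] ∧ (scanChunk b cs).1 = b + total cs) := by
  intro cs
  induction cs with
  | nil =>
    intro b hb
    refine ⟨?_, ?_⟩
    · intro h; exact absurd h (by simpa [scanChunk] using hb)
    · intro _; simp [scanChunk, sums, total]
  | cons c t ih =>
    intro b hb
    simp only [scanChunk]
    by_cases hz : b + valv c = 0
    · refine ⟨?_, ?_⟩
      · intro _
        simp only [if_pos hz]
        constructor
        · simp only [sums, hz, List.count_cons]
          simp
          omega
        · simp [total]; omega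
      · intro h; exact absurd (by simp [if_pos hz]) h
    · simp only [if_neg hz]
      obtain ⟨ih1, ih2⟩ := ih (b + valv c) hz
      refine ⟨?_, ?_⟩
      · intro h
        obtain ⟨ha, hb'⟩ := ih1 h
        constructor
        · simp only [sums, List.count_cons, beq_iff_eq]
          rw [if_neg hz]
          simpa using ha
        · simp only [total, List.map_cons, List.sum_cons] at hb' ⊢
          omega
      · intro h
        obtain ⟨ha, hb', hc'⟩ := ih2 h
        refine ⟨?_, hb', ?_⟩
        · simp only [sums, List.count_cons, beq_iff_eq]
          rw [if_neg hz]
          simpa using ha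
        · simp only [total, List.map_cons, List.sum_cons] at hc' ⊢
          omega

theorem valv_ne_zero (c : Char) : valv c ≠ 0 := by
  unfold valv; split <;> omega

-- outer-loop characterisation: chunks = -1 iff unbalanced, else the zero count of prefix balances
theorem chunks_spec_aux : ∀ (m : Nat) (cs : List Char), cs.length ≤ m →
    chunks cs = if total cs = 0 then ((sums 0 cs).count 0 : Int) else -1 := by
  intro m
  induction m with
  | zero =>
    intro cs h
    have : cs = [] := List.eq_nil_of_length_eq_zero (Nat.le_zero.mp h)
    subst this; simp [chunks, total, sums]
  | succ m ih =>
    intro cs h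
    cases cs with
    | nil => simp [chunks, total, sums]
    | cons c t =>
      have hb := valv_ne_zero c
      obtain ⟨S1, S2⟩ := scanChunk_spec t (valv c) hb
      rw [chunks]
      simp only []
      by_cases hz : (scanChunk (valv c) t).1 = 0
      · obtain ⟨ha, ht⟩ := S1 hz
        have hlen : (scanChunk (valv c) t).2.length ≤ m := by
          have := scanChunk_len t (valv c)
          simp only [List.length_cons] at h
          omega
        have ihr := ih (scanChunk (valv c) t).2 hlen
        rw [if_neg (by simpa using hz)]
        have htot : total (c :: t) = total (scanChunk (valv c) t).2 := by
          simp only [total, List.map_cons, List.sum_cons] at ht ⊢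
          omega
        have hcnt : ((sums 0 (c :: t)).count 0 : Int)
            = 1 + ((sums 0 (scanChunk (valv c) t).2).count 0 : Int) := by
          simp only [sums, List.count_cons, zero_add]
          rw [if_neg (by simpa using hb)]
          simpa using ha
        by_cases ht0 : total (scanChunk (valv c) t).2 = 0
        · rw [ihr, if_pos ht0]
          rw [if_neg (by omega)]
          rw [if_pos (htot ▸ ht0), hcnt]
        · rw [ihr, if_neg ht0, if_pos rfl,
            if_neg (show ¬ total (c :: t) = 0 by rw [htot]; exact ht0)]
      · obtain ⟨_, _, hval⟩ := S2 hz
        rw [if_pos (by simpa using hz)]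
        have : total (c :: t) ≠ 0 := by
          simp only [total, List.map_cons, List.sum_cons]
          simp only [total] at hval
          omega
        rw [if_neg this]

-- ===== VERDICT (by name: the statement is the Claim_ definition above) =====
theorem maxSubStr_spec : Claim_equal_maxSubStr := by
  intro str n _hDom _hPre
  unfold Spec_maxSubStr maxSubStr maxSubStr_alt
  set L := PySem.List.pyRange 0 n 1 with hLdef
  set cs : List Char := L.map (fun i => (PySem.Str.pyGet? str i).getD '1') with hcs
  obtain ⟨hA1, hA2⟩ := foldA_spec cs str L 0 0 0 hcs.symm
  rw [chunks_spec_aux cs.length cs (le_refl _)]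
  by_cases ht : total cs = 0
  · have hne : ¬ ((L.foldl (stepA str) (0,0,0)).1 ≠ (L.foldl (stepA str) (0,0,0)).2.1) := by
      omega
    simp only [if_neg hne, if_pos ht]
    rw [hA2]
    norm_num
  · have hne : (L.foldl (stepA str) (0,0,0)).1 ≠ (L.foldl (stepA str) (0,0,0)).2.1 := by
      omega
    simp only [if_pos hne, if_neg ht]
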